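-- pv_equiv track=rewrite | github.com/ShreyasTannu/site-factory | app.py | normalize_project_name
-- ===== SOURCE A (Python) =====
-- def normalize_project_name(value: str) -> str:
--     normalized = value.strip().lower().replace(" ", "-").replace("_", "-")
--     cleaned = []
--     previous_was_dash = False
--
--     for char in normalized:
--         if char.isalnum():
--             cleaned.append(char)
--             previous_was_dash = False
--         elif char == "-":
--             if not previous_was_dash:
--                 cleaned.append(char)
--             previous_was_dash = True
--
--     return "".join(cleaned).strip("-")
-- ===== SOURCE B (Python) =====
-- def normalize_project_name(value: str) -> str:
--     normalized = value.strip().lower().replace(" ", "-").replace("_", "-")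
--     words = ("".join(c for c in segment if c.isalnum())
--              for segment in normalized.split("-"))
--     return "-".join(w for w in words if w)
-- ===== Notes on version B (the rewrite author's own statement) =====
-- stated objective: simpler
-- what changed: Replaces the char-by-char loop with its previous_was_dash state flag and the final dash-strip by a stateless decomposition: split on the dash separator, keep only the alphanumeric characters of each segment, and join the non-empty words.
import Mathlib
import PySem

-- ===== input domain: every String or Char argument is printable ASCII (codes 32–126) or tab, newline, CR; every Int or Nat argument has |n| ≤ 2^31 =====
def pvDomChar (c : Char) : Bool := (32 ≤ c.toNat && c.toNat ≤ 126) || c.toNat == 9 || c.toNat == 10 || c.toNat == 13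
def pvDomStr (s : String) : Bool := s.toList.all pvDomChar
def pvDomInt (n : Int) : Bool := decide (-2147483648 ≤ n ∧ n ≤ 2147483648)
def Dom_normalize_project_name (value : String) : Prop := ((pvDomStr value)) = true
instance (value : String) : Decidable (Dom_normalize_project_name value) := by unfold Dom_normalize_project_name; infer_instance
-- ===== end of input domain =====

-- B replaces A's stateful char loop by split-on-dash / filter / join (objective: simpler); return values proved equal.

-- ===== PORT A =====
def normalize_project_name (value : String) : String :=
  let normalized := PySem.Str.replace (PySem.Str.replace (PySem.Str.lower (PySem.Str.strip value)) " " "-") "_" "-"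
  let r := normalized.toList.foldl
    (fun (st : List Char × Bool) char =>
      if PySem.Chars.isalnum char then (st.1 ++ [char], false)
      else if char = '-' then
        ((if st.2 then st.1 else st.1 ++ [char]), true)
      else st)
    ([], false)
  PySem.Str.stripChars (PySem.Str.join "" (r.1.map (fun c => String.ofList [c]))) "-"

-- ===== PORT B =====
def normalize_project_name_alt (value : String) : String :=
  let normalized := PySem.Str.replace (PySem.Str.replace (PySem.Str.lower (PySem.Str.strip value)) " " "-") "_" "-"
  let words := (PySem.Chars.splitOn normalized.toList ['-']).map
      (fun segment => PySem.Str.join "" ((segment.filter PySem.Chars.isalnum).map (fun c => String.ofList [c])))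
  PySem.Str.join "-" (words.filter (fun w => w ≠ ""))

-- ===== PRECONDITION & SPEC =====
def Spec_normalize_project_name (value : String) (out : String) : Prop := out = normalize_project_name_alt value
instance (value : String) (out : String) : Decidable (Spec_normalize_project_name value out) := by unfold Spec_normalize_project_name; infer_instance

-- ===== CLAIM (what is proved, stated in full; the proofs are below) =====
def Claim_equal_normalize_project_name : Prop := ∀ (value : String), Dom_normalize_project_name value → Spec_normalize_project_name value (normalize_project_name value)

-- ===== LEMMAS AND PROOFS =====

-- split of a char list at '-' : head segment and tail segments
def pvSplit (cs : List Char) : List Char × List (List Char) :=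
  match cs with
  | [] => ([], [])
  | c :: cs' =>
    let r := pvSplit cs'
    if c = '-' then ([], r.1 :: r.2) else (c :: r.1, r.2)

lemma pv_go_eq : ∀ (cs : List Char) (fuel : Nat) (cur : List Char) (acc : List (List Char)),
    cs.length ≤ fuel →
    PySem.Chars.splitOn.go ['-'] fuel cs cur acc =
      acc.reverse ++ ((cur.reverse ++ (pvSplit cs).1) :: (pvSplit cs).2) := by
  intro cs
  induction cs with
  | nil =>
    intro fuel cur acc h
    cases fuel with
    | zero => simp [PySem.Chars.splitOn.go, pvSplit]
    | succ n => simp [PySem.Chars.splitOn.go, pvSplit]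
  | cons c rest ih =>
    intro fuel cur acc h
    cases fuel with
    | zero => simp at h
    | succ n =>
      rw [PySem.Chars.splitOn.go]
      by_cases hc : c = '-'
      · subst hc
        simp only [List.isPrefixOf, beq_self_eq_true, Bool.and_self, if_pos, pvSplit,
          List.length_cons, List.length_nil, List.drop_succ_cons, List.drop_zero]
        rw [ih n [] (cur.reverse :: acc) (by simpa using h)]
        simp
      · have : List.isPrefixOf ['-'] (c :: rest) = false := by
          simp [List.isPrefixOf]; exact fun hh => hc (by simpa using hh.symm) 
        simp only [this, Bool.false_eq_true, if_false]
        rw [ih n (c :: cur) acc (by simpa using Nat.le_of_succ_le_succ h)]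
        simp [pvSplit, hc]

lemma pv_splitOn_eq (cs : List Char) :
    PySem.Chars.splitOn cs ['-'] = (pvSplit cs).1 :: (pvSplit cs).2 := by
  rw [PySem.Chars.splitOn, pv_go_eq cs (cs.length + 1) [] [] (by omega)]
  simp

def pvBody (flag : Bool) : List Char → List Char
  | [] => []
  | c :: cs =>
    if PySem.Chars.isalnum c then c :: pvBody false cs
    else if c = '-' then (if flag then pvBody true cs else '-' :: pvBody true cs)
    else pvBody flag cs

lemma pv_fold_eq : ∀ (cs : List Char) (acc : List Char) (flag : Bool),
    (cs.foldl
      (fun (st : List Char × Bool) char =>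
        if PySem.Chars.isalnum char then (st.1 ++ [char], false)
        else if char = '-' then ((if st.2 then st.1 else st.1 ++ [char]), true)
        else st)
      (acc, flag)).1 = acc ++ pvBody flag cs := by
  intro cs
  induction cs with
  | nil => intro acc flag; simp [pvBody]
  | cons c rest ih =>
    intro acc flag
    simp only [List.foldl_cons]
    by_cases h1 : PySem.Chars.isalnum c
    · simp [h1, ih, pvBody]
    · by_cases h2 : c = '-'
      · subst h2
        have hd : PySem.Chars.isalnum '-' = false := by decide
        cases flag <;> simp [hd, ih, pvBody]
      · simp [h1, h2, ih, pvBody]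

def pvP : List (List Char) → List Char
  | [] => []
  | s :: rest => if s = [] then pvP rest else s ++ (if rest = [] then [] else '-' :: pvP rest)

def pvQ (rest : List (List Char)) : List Char := if rest = [] then [] else '-' :: pvP rest

lemma pvP_cons (s : List Char) (rest : List (List Char)) :
    pvP (s :: rest) = if s = [] then pvP rest else s ++ pvQ rest := rfl

def pvJ (ss : List (List Char)) : List Char :=
  PySem.Chars.join ['-'] (ss.filter (fun s => s ≠ []))

lemma pv_body_eq_P : ∀ (cs : List Char),
    pvBody false cs = ((pvSplit cs).1.filter PySem.Chars.isalnum) ++ pvQ ((pvSplit cs).2.map (List.filter PySem.Chars.isalnum))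
    ∧ pvBody true cs = pvP (((pvSplit cs).1.filter PySem.Chars.isalnum) :: (pvSplit cs).2.map (List.filter PySem.Chars.isalnum)) := by
  intro cs
  induction cs with
  | nil => constructor <;> simp [pvBody, pvSplit, pvQ, pvP]
  | cons c rest ih =>
    obtain ⟨ih1, ih2⟩ := ih
    by_cases h1 : PySem.Chars.isalnum c
    · have hc : ¬ c = '-' := by rintro rfl; exact absurd h1 (by decide)
      constructor
      · simp [pvBody, pvSplit, h1, hc, ih1]
      · simp [pvBody, pvSplit, h1, hc, ih1, pvP_cons]
    · by_cases h2 : c = '-'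
      · subst h2
        constructor
        · simp [pvBody, pvSplit, h1, ih2, pvQ, pvP_cons]
        · simp [pvBody, pvSplit, h1, ih2, pvP_cons]
      · constructor
        · simp [pvBody, pvSplit, h1, h2, ih1]
        · simp [pvBody, pvSplit, h1, h2, ih2, pvP_cons]

def pvAllAlnum (ss : List (List Char)) : Prop := ∀ s ∈ ss, ∀ c ∈ s, PySem.Chars.isalnum c = true

def pvRd (xs : List Char) : List Char :=
  (List.dropWhile (fun c => List.contains ['-'] c) xs.reverse).reverse

lemma pv_ne_dash {c : Char} (h : PySem.Chars.isalnum c = true) : c ≠ '-' := by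
  rintro rfl; exact absurd h (by decide)

lemma pv_not_dash {c : Char} (h : PySem.Chars.isalnum c = true) :
    List.contains ['-'] c = false := by
  have := pv_ne_dash h
  simp only [List.contains_cons, List.contains_nil, Bool.or_false, beq_eq_false_iff_ne, ne_eq]
  exact fun hh => this hh

lemma pv_dropWhile_all {xs : List Char} (h : ∀ c ∈ xs, PySem.Chars.isalnum c = true) :
    List.dropWhile (fun c => List.contains ['-'] c) xs = xs := by
  cases xs with
  | nil => rfl
  | cons c rest =>
    rw [List.dropWhile_cons, if_neg]
    rw [pv_not_dash (h c List.mem_cons_self)]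
    simp

lemma pv_rd_alnum {s : List Char} (h : ∀ c ∈ s, PySem.Chars.isalnum c = true) : pvRd s = s := by
  rw [pvRd, pv_dropWhile_all (by simpa using h), List.reverse_reverse]

lemma pv_rd_append (xs ys : List Char) :
    pvRd (xs ++ ys) = if pvRd ys = [] then pvRd xs else xs ++ pvRd ys := by
  rw [pvRd, List.reverse_append, List.dropWhile_append]
  split_ifs with h1 h2 h2
  · rfl
  · exact absurd (by rw [pvRd, List.isEmpty_iff.mp h1]; rfl) h2
  · have e2 : List.dropWhile (fun c => List.contains ['-'] c) ys.reverse = [] := by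
      have := congrArg List.reverse h2
      simpa [pvRd] using this
    exact absurd (by rw [e2]; rfl) h1
  · simp [pvRd]

lemma pv_rd_dash (xs : List Char) :
    pvRd ('-' :: xs) = if pvRd xs = [] then [] else '-' :: pvRd xs := by
  have := pv_rd_append ['-'] xs
  simp only [List.singleton_append] at this
  rw [this]
  split_ifs <;> simp [pvRd]

lemma pv_join_cons (x : List Char) (ys : List (List Char)) :
    PySem.Chars.join ['-'] (x :: ys) = x ++ (if ys = [] then [] else '-' :: PySem.Chars.join ['-'] ys) := by
  cases ys with
  | nil => simp [PySem.Chars.join, List.intercalate]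
  | cons y l => simp [PySem.Chars.join, List.intercalate, List.intersperse]

lemma pv_J_nil_iff (ss : List (List Char)) :
    pvJ ss = [] ↔ ss.filter (fun s => s ≠ []) = [] := by
  constructor
  · intro h
    cases hf : ss.filter (fun s => s ≠ []) with
    | nil => rfl
    | cons y l =>
      have hy : y ≠ [] := by
        have := List.mem_filter.mp (hf ▸ List.mem_cons_self)
        simpa using this.2
      rw [pvJ, hf, pv_join_cons] at h
      rcases List.append_eq_nil_iff.mp h with ⟨h1, _⟩
      exact absurd h1 hy
  · intro h; rw [pvJ, h]; rfl

lemma pv_rd_P : ∀ (ss : List (List Char)), pvAllAlnum ss → pvRd (pvP ss) = pvJ ss := by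
  intro ss
  induction ss with
  | nil => intro _; simp [pvP, pvJ, pvRd, PySem.Chars.join, List.intercalate]
  | cons s rest ih =>
    intro h
    have hrest : pvAllAlnum rest := fun t ht => h t (List.mem_cons_of_mem _ ht)
    have hs : ∀ c ∈ s, PySem.Chars.isalnum c = true := h s List.mem_cons_self
    by_cases hse : s = []
    · subst hse
      rw [pvP_cons, if_pos rfl, ih hrest]
      simp [pvJ]
    · have hfil : List.filter (fun s => decide (s ≠ [])) (s :: rest) =
          s :: List.filter (fun s => decide (s ≠ [])) rest := by
        rw [List.filter_cons, if_pos (by simpa using hse)]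
      rw [pvP_cons, if_neg hse]
      by_cases hre : rest = []
      · subst hre
        rw [show pvQ ([] : List (List Char)) = [] from rfl, List.append_nil, pv_rd_alnum hs]
        rw [pvJ, hfil]
        simp
      · rw [show pvQ rest = '-' :: pvP rest by rw [pvQ, if_neg hre],
          pv_rd_append, pv_rd_dash, ih hrest]
        by_cases hj : pvJ rest = []
        · have hf : List.filter (fun s => decide (s ≠ [])) rest = [] := (pv_J_nil_iff rest).mp hj
          have hcond : (if pvJ rest = [] then ([] : List Char) else '-' :: pvJ rest) = [] := by
            rw [if_pos hj]
          have hR : pvJ (s :: rest) = s := by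
            rw [pvJ, hfil, hf, pv_join_cons, if_pos rfl, List.append_nil]
          rw [hcond, if_pos rfl, pv_rd_alnum hs, hR]
        · have hcond : (if pvJ rest = [] then ([] : List Char) else '-' :: pvJ rest) = '-' :: pvJ rest := by
            rw [if_neg hj]
          have hR : pvJ (s :: rest) = s ++ '-' :: pvJ rest := by
            rw [pvJ, hfil, pv_join_cons, if_neg (fun hf => hj ((pv_J_nil_iff rest).mpr hf))]
            rfl
          rw [hcond, if_neg (by simp), hR]

lemma pv_dropWhile_P : ∀ (ss : List (List Char)), pvAllAlnum ss →
    List.dropWhile (fun c => List.contains ['-'] c) (pvP ss) = pvP ss := by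
  intro ss
  induction ss with
  | nil => intro _; rfl
  | cons s rest ih =>
    intro h
    have hrest : pvAllAlnum rest := fun t ht => h t (List.mem_cons_of_mem _ ht)
    by_cases hse : s = []
    · subst hse; rw [pvP_cons, if_pos rfl]; exact ih hrest
    · rw [pvP_cons, if_neg hse]
      cases s with
      | nil => exact absurd rfl hse
      | cons c s' =>
        rw [List.cons_append, List.dropWhile_cons, if_neg]
        rw [pv_not_dash (h _ List.mem_cons_self c List.mem_cons_self)]
        simp

lemma pv_drop_PQ (ft : List Char) (fts : List (List Char)) (h : pvAllAlnum (ft :: fts)) :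
    List.dropWhile (fun c => List.contains ['-'] c) (ft ++ pvQ fts) = pvP (ft :: fts) := by
  cases ft with
  | nil =>
    rw [List.nil_append, pvP_cons, if_pos rfl, pvQ]
    by_cases hf : fts = []
    · rw [if_pos hf]; subst hf; rfl
    · rw [if_neg hf, List.dropWhile_cons, if_pos (by decide)]
      exact pv_dropWhile_P fts (fun t ht => h t (List.mem_cons_of_mem _ ht))
  | cons c ft' =>
    have hc : PySem.Chars.isalnum c = true := h _ List.mem_cons_self c List.mem_cons_self
    rw [pvP_cons, if_neg (by simp), List.cons_append, List.dropWhile_cons, if_neg]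
    rw [pv_not_dash hc]
    simp

lemma pv_core (cs : List Char) :
    PySem.Chars.stripChars (pvBody false cs) ['-'] =
      PySem.Chars.join ['-']
        ((((pvSplit cs).1 :: (pvSplit cs).2).map (List.filter PySem.Chars.isalnum)).filter (fun s => s ≠ [])) := by
  have hall : pvAllAlnum (((pvSplit cs).1.filter PySem.Chars.isalnum) ::
      (pvSplit cs).2.map (List.filter PySem.Chars.isalnum)) := by
    intro s hsmem c hc
    rcases List.mem_cons.mp hsmem with rfl | hsm
    · exact (List.mem_filter.mp hc).2
    · rcases List.mem_map.mp hsm with ⟨t, _, rfl⟩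
      exact (List.mem_filter.mp hc).2
  have hdrop : List.dropWhile (fun c => List.contains ['-'] c) (pvBody false cs)
      = pvP (((pvSplit cs).1.filter PySem.Chars.isalnum) ::
          (pvSplit cs).2.map (List.filter PySem.Chars.isalnum)) := by
    rw [(pv_body_eq_P cs).1]
    exact pv_drop_PQ _ _ hall
  have hstrip : PySem.Chars.stripChars (pvBody false cs) ['-'] =
      pvRd (List.dropWhile (fun c => List.contains ['-'] c) (pvBody false cs)) := rfl
  rw [hstrip, hdrop, pv_rd_P _ hall, pvJ, List.map_cons]


theorem normalize_project_name_spec : Claim_equal_normalize_project_name := by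
  intro value _
  unfold Spec_normalize_project_name normalize_project_name normalize_project_name_alt
  rw [← String.toList_inj]
  simp only [PySem.Str.toList_stripChars, PySem.Str.toList_join, List.map_map]
  generalize (PySem.Str.replace (PySem.Str.replace (PySem.Str.lower (PySem.Str.strip value)) " " "-") "_" "-").toList = cs
  have hemp : ("".toList : List Char) = [] := by decide
  have hdash : ("-".toList : List Char) = ['-'] := by decide
  have hjoin1 : ∀ xs : List Char, PySem.Str.join "" (xs.map (fun c => String.ofList [c])) = String.ofList xs := by
    intro xs
    rw [← String.toList_inj, PySem.Str.toList_join, hemp, List.map_map]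
    simp only [Function.comp_def, String.toList_ofList, PySem.Chars.join_nil_singletons]
  rw [hemp, hdash]
  simp only [Function.comp_def, String.toList_ofList]
  rw [PySem.Chars.join_nil_singletons, pv_fold_eq, List.nil_append]
  rw [pv_splitOn_eq]
  simp only [hjoin1]
  rw [List.filter_map, List.map_map]
  simp only [Function.comp_def, String.toList_ofList]
  have hof : ∀ xs : List Char, (String.ofList xs = "") ↔ xs = [] := by
    intro xs
    rw [← String.toList_inj, String.toList_ofList, hemp]
  have hpred : ∀ l : List (List Char),
      List.filter (fun seg => decide (String.ofList (List.filter PySem.Chars.isalnum seg) ≠ "")) l =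
      List.filter (fun seg => decide ((List.filter PySem.Chars.isalnum seg) ≠ [])) l := by
    intro l
    apply List.filter_congr
    intro x _
    simp [hof]
  rw [hpred, pv_core, List.filter_map]
  rfl
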